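-- pv_equiv track=rewrite | github.com/hashmiDeveloper745/pythonExpress | hashTable.py | repeatedName
-- ===== SOURCE A (Python) =====
-- def repeatedName(given_list):
--   dictionary_name = {}
--   for name in given_list:
--     if name in dictionary_name:
--       return name
--     else:
--       dictionary_name[name] = 1
--   return 'There is no name that appears twice'
-- ===== SOURCE B (Python) =====
-- def repeatedName(given_list):
--   repeats = [name for j, name in enumerate(given_list)
--              if given_list.index(name) != j]
--   return repeats[0] if repeats else 'There is no name that appears twice'
-- ===== Notes on version B (the rewrite author's own statement) =====
-- stated objective: alternative
-- what changed: B maintains no seen-dictionary and has no early return: it does a staged computation, first collecting every position whose element's global first occurrence (list.index) lies strictly earlier, then takes the head of that list (or the message if empty).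
import Mathlib
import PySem

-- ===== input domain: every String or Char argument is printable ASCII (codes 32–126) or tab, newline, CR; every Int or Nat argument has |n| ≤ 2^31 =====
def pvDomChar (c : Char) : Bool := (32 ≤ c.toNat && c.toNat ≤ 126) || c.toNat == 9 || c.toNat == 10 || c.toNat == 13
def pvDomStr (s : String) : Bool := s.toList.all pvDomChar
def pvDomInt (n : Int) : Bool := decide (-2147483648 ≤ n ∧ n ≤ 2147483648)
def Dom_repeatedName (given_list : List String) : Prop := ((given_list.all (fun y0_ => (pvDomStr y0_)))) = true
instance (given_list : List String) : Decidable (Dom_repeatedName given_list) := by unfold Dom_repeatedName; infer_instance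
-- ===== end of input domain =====

-- B replaces A's early-returning seen-dictionary pass by a staged computation: collect all
-- positions whose element's global first occurrence (list.index) is earlier, then take the head.

-- ===== PORT A =====
-- loop: for name in given_list: if name in dictionary_name: return name else dictionary_name[name] = 1
def repeatedNameGoA (d : PySem.Dict String Int) : List String → String
  | [] => "There is no name that appears twice"
  | name :: rest =>
      if d.contains name then name
      else repeatedNameGoA (d.insert name 1) rest

def repeatedName (given_list : List String) : String :=
  repeatedNameGoA PySem.Dict.empty given_list

-- ===== PORT B =====
-- repeats = [name for j, name in enumerate(given_list) if given_list.index(name) != j]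
-- return repeats[0] if repeats else 'There is no name that appears twice'
def repeatedName_alt (given_list : List String) : String :=
  let repeats :=
    ((PySem.List.enumerate given_list).filter
        (fun p => !((PySem.List.index? given_list p.2).map (fun n => (n : Int)) == some p.1))).map
      (fun p => p.2)
  match repeats with
  | [] => "There is no name that appears twice"
  | x :: _ => x

-- ===== PRECONDITION & SPEC =====
def Spec_repeatedName (given_list : List String) (out : String) : Prop := out = repeatedName_alt given_list
instance (given_list : List String) (out : String) : Decidable (Spec_repeatedName given_list out) := by unfold Spec_repeatedName; infer_instance

-- ===== CLAIM (what is proved, stated in full; the proofs are below) =====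
def Claim_equal_repeatedName : Prop := ∀ (given_list : List String), Dom_repeatedName given_list → Spec_repeatedName given_list (repeatedName given_list)

-- ===== LEMMAS AND PROOFS =====

-- B's filter predicate at a valid position k holds iff l[k] already occurs in the prefix before k.
theorem pred_iff (l : List String) (k : Nat) (hk : k < l.length) :
    ((!((PySem.List.index? l l[k]).map (fun n => (n : Int)) == some (k : Int))) = true)
      ↔ l[k] ∈ l.take k := by
  have hmem : l[k] ∈ l := List.getElem_mem hk
  obtain ⟨m, hm⟩ := Option.isSome_iff_exists.mp ((PySem.List.index?_isSome_iff l l[k]).mpr hmem)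
  obtain ⟨hm_lt, hml, hmin⟩ := PySem.List.getElem_of_index?_eq_some hm
  have hiff : ((!((PySem.List.index? l l[k]).map (fun n => (n : Int)) == some (k : Int))) = true) ↔ m ≠ k := by
    rw [hm]; simp
  rw [hiff]
  constructor
  · intro hne
    have hmk : m ≤ k := by
      by_contra h
      exact hmin k (by omega) rfl
    have hmlt : m < k := lt_of_le_of_ne hmk hne
    have : ∃ i, ∃ h : i < (l.take k).length, (l.take k)[i] = l[k] := by
      refine ⟨m, by simp; omega, ?_⟩
      simpa [List.getElem_take] using hml
    exact List.mem_iff_getElem.mpr this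
  · intro htake
    obtain ⟨j, hj, hjv⟩ := List.mem_iff_getElem.mp htake
    have hjk : j < k := by simp at hj; omega
    have hjl : l[j]'(by omega) = l[k] := by simpa [List.getElem_take] using hjv
    have hmj : m ≤ j := by
      by_contra h
      exact hmin j (by omega) hjl
    omega

theorem go_eq (l : List String) : ∀ (rest pre : List String) (d : PySem.Dict String Int),
    l = pre ++ rest → pre.Nodup → (∀ x, d.contains x = decide (x ∈ pre)) →
    repeatedNameGoA d rest =
      (match ((PySem.List.enumerate rest (pre.length : Int)).filter
          (fun p => !((PySem.List.index? l p.2).map (fun n => (n : Int)) == some p.1))).map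
          (fun p => p.2) with
       | [] => "There is no name that appears twice"
       | x :: _ => x) := by
  intro rest
  induction rest with
  | nil => intro pre d _ _ _; simp [repeatedNameGoA, PySem.List.enumerate_nil]
  | cons name rest ih =>
    intro pre d hl hnd hinv
    rw [PySem.List.enumerate_cons]
    have hk : pre.length < l.length := by subst hl; simp
    have hget : l[pre.length]'hk = name := by
      subst hl
      rw [List.getElem_append_right (le_refl _)]
      simp
    have htake : l.take pre.length = pre := by subst hl; simp
    have hpred := pred_iff l pre.length hk
    rw [hget, htake] at hpred
    by_cases hmem : name ∈ pre
    · have hb : (!((PySem.List.index? l name).map (fun n => (n : Int)) == some ((pre.length : Nat) : Int))) = true :=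
        hpred.mpr hmem
      simp only [repeatedNameGoA, hinv name, hmem, decide_true, if_true, List.filter_cons, hb]
      simp
    · have hb : (!((PySem.List.index? l name).map (fun n => (n : Int)) == some ((pre.length : Nat) : Int))) = false := by
        rw [Bool.eq_false_iff]
        intro h
        exact hmem (hpred.mp h)
      have hrec := ih (pre ++ [name]) (d.insert name 1)
        (by simp [hl])
        (by simp [List.Nodup.append, hnd, hmem])
        (fun x => by
          rw [PySem.Dict.contains_insert, hinv x]
          by_cases hx : x = name <;> simp [hx])
      simp only [repeatedNameGoA, hinv name, hmem, decide_false, List.filter_cons, hb,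
        Bool.false_eq_true, if_false]
      have hlen : ((pre ++ [name]).length : Int) = (pre.length : Int) + 1 := by simp
      rw [hlen] at hrec
      exact hrec

-- ===== VERDICT (by name: the statement is the Claim_ definition above) =====
theorem repeatedName_spec : Claim_equal_repeatedName := by
  intro given_list _
  show repeatedName given_list = repeatedName_alt given_list
  have := go_eq given_list given_list [] PySem.Dict.empty (by simp) (by simp) (fun x => by simp)
  simpa [repeatedName, repeatedName_alt, PySem.List.enumerate] using this
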